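-- pv_equiv track=rewrite | github.com/jt1402/disposable_email_api | app/detection/layers/blocklist.py | _candidate_domains
-- ===== SOURCE A (Python) =====
-- def _candidate_domains(domain: str) -> list[str]:
--     """Most-specific to least-specific; single-label domains are skipped."""
--     parts = domain.split(".")
--     candidates = []
--     for i in range(len(parts) - 1):
--         candidate = ".".join(parts[i:])
--         if "." in candidate:
--             candidates.append(candidate)
--     return candidates
-- ===== SOURCE B (Python) =====
-- def _candidate_domains(domain: str) -> list[str]:
--     """Most-specific to least-specific; single-label domains are skipped."""
--     parts = domain.split(".")
--     out = []
--     suffix = parts[-1]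
--     for part in reversed(parts[:-1]):
--         suffix = part + "." + suffix
--         out.append(suffix)
--     out.reverse()
--     return out
-- ===== Notes on version B (the rewrite author's own statement) =====
-- stated objective: alternative
-- what changed: B builds each suffix from the previous one by a single right-to-left accumulation (suffix = part + sep + suffix) and reverses the collected list, instead of A's per-index slice-and-join over the whole tail; the separator-membership test disappears because every accumulated suffix has at least two labels.
import Mathlib
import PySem

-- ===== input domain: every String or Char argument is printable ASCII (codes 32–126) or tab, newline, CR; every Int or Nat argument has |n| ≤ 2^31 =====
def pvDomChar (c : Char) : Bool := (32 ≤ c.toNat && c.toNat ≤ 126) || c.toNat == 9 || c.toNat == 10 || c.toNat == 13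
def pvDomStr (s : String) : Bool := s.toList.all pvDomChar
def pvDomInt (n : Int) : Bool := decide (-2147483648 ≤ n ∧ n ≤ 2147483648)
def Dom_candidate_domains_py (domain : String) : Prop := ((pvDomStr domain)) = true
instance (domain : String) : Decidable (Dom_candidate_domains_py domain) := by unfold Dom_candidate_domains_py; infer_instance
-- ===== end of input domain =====

-- B builds each suffix from the previous one right-to-left (one O(1)-per-label accumulation)
-- instead of A's repeated slice-and-join per start index; same return value on every input.

-- ===== PORT A =====
-- parts = domain.split("."); for i in range(len(parts)-1): candidate = ".".join(parts[i:]);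
--   if "." in candidate: candidates.append(candidate)
def candidate_domains_py (domain : String) : List String :=
  let parts := PySem.Chars.splitOn domain.toList ['.']
  (PySem.List.pyRange 0 ((parts.length : Int) - 1) 1).foldl
    (fun candidates i =>
      let candidate := PySem.Chars.join ['.'] (PySem.List.slice parts (some i) none)
      if PySem.Chars.isIn ['.'] candidate then candidates ++ [String.ofList candidate]
      else candidates) []

-- ===== PORT B =====
-- parts = domain.split("."); suffix = parts[-1]; for part in reversed(parts[:-1]):
--   suffix = part + "." + suffix; out.append(suffix); out.reverse(); return out
-- (splitOn never returns [], so the [] branch is only a totalization guard for parts[-1])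
def candidate_domains_py_alt (domain : String) : List String :=
  let parts := PySem.Chars.splitOn domain.toList ['.']
  match parts.reverse with
  | [] => []
  | last :: rest =>
    let st := rest.foldl
      (fun (st : List String × List Char) part =>
        let suffix := part ++ '.' :: st.2
        (st.1 ++ [String.ofList suffix], suffix)) ([], last)
    st.1.reverse

-- ===== PRECONDITION & SPEC =====
def Spec_candidate_domains_py (domain : String) (out : List String) : Prop := out = candidate_domains_py_alt domain
instance (domain : String) (out : List String) : Decidable (Spec_candidate_domains_py domain out) := by unfold Spec_candidate_domains_py; infer_instance

-- ===== CLAIM (what is proved, stated in full; the proofs are below) =====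
def Claim_equal_candidate_domains_py : Prop := ∀ (domain : String), Dom_candidate_domains_py domain → Spec_candidate_domains_py domain (candidate_domains_py domain)

-- ===== LEMMAS AND PROOFS =====

-- the suffix "part + '.' + suffix" accumulated from the right, starting from the last label
def pvSfx : List (List Char) → List Char → List Char
  | [], last => last
  | q :: qs, last => q ++ '.' :: pvSfx qs last

-- the expected output: suffixes of (init ++ [last]) with at least two labels, most-specific first
def pvOuts : List (List Char) → List Char → List String
  | [], _ => []
  | q :: qs, last => String.ofList (pvSfx (q :: qs) last) :: pvOuts qs last

-- B's loop body
def pvBStep (st : List String × List Char) (part : List Char) : List String × List Char :=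
  (st.1 ++ [String.ofList (part ++ '.' :: st.2)], part ++ '.' :: st.2)

-- A's loop, as a function of the split parts (definitionally the body of port A)
def pvACore (parts : List (List Char)) : List String :=
  (PySem.List.pyRange 0 ((parts.length : Int) - 1) 1).foldl
    (fun candidates i =>
      let candidate := PySem.Chars.join ['.'] (PySem.List.slice parts (some i) none)
      if PySem.Chars.isIn ['.'] candidate then candidates ++ [String.ofList candidate]
      else candidates) []

-- B's loop, as a function of the split parts (definitionally the body of port B)
def pvBCore (parts : List (List Char)) : List String :=
  match parts.reverse with
  | [] => []
  | last :: rest => (rest.foldl pvBStep ([], last)).1.reverse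

lemma dot_mem_sfx (q : List Char) (qs : List (List Char)) (last : List Char) :
    '.' ∈ pvSfx (q :: qs) last := by
  simp [pvSfx]

lemma join_concat (l : List (List Char)) (last : List Char) :
    PySem.Chars.join ['.'] (l ++ [last]) = pvSfx l last := by
  induction l with
  | nil => simp [pvSfx, PySem.Chars.join_singleton]
  | cons q qs ih =>
    cases qs with
    | nil =>
      simp [pvSfx, PySem.Chars.join_cons_cons, PySem.Chars.join_singleton]
    | cons q2 qs2 =>
      have h2 : ((q2 :: qs2) ++ [last]) = q2 :: (qs2 ++ [last]) := rfl
      have h1 : ((q :: q2 :: qs2) ++ [last]) = q :: ((q2 :: qs2) ++ [last]) := rfl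
      rw [h1, h2, PySem.Chars.join_cons_cons, ← h2, ih]
      simp [pvSfx]

lemma splitOn_go_ne_nil (fuel : Nat) :
    ∀ (sep l cur : List Char) (acc : List (List Char)),
      PySem.Chars.splitOn.go sep fuel l cur acc ≠ [] := by
  induction fuel with
  | zero => intro sep l cur acc; simp [PySem.Chars.splitOn.go]
  | succ n ih =>
    intro sep l cur acc
    cases l with
    | nil => simp [PySem.Chars.splitOn.go]
    | cons c rest =>
      rw [PySem.Chars.splitOn.go]
      split
      · exact ih _ _ _ _
      · exact ih _ _ _ _

lemma splitOn_ne_nil (s sep : List Char) : PySem.Chars.splitOn s sep ≠ [] := by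
  unfold PySem.Chars.splitOn
  exact splitOn_go_ne_nil _ _ _ _ _

lemma fold_spec (ps : List (List Char)) :
    ∀ (last : List Char) (acc : List String),
      ps.reverse.foldl pvBStep (acc, last) = (acc ++ (pvOuts ps last).reverse, pvSfx ps last) := by
  induction ps with
  | nil => intro last acc; simp [pvOuts, pvSfx]
  | cons q qs ih =>
    intro last acc
    have h : (q :: qs).reverse = qs.reverse ++ [q] := by simp
    rw [h, List.foldl_append, ih]
    simp [pvBStep, pvOuts, pvSfx]

lemma range_map_eq_outs (init : List (List Char)) (last : List Char) :
    (List.range init.length).map (fun k => String.ofList (pvSfx (init.drop k) last)) = pvOuts init last := by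
  induction init with
  | nil => simp [pvOuts]
  | cons q qs ih =>
    rw [List.length_cons, List.range_succ_eq_map, List.map_cons, List.map_map]
    have h2 : ((fun k => String.ofList (pvSfx ((q :: qs).drop k) last)) ∘ Nat.succ)
        = fun k => String.ofList (pvSfx (qs.drop k) last) := by
      funext k; rfl
    rw [h2, ih]
    rfl

lemma B_concat (init : List (List Char)) (last : List Char) :
    pvBCore (init ++ [last]) = pvOuts init last := by
  unfold pvBCore
  have hrev : (init ++ [last]).reverse = last :: init.reverse := by simp
  rw [hrev]
  show (init.reverse.foldl pvBStep ([], last)).1.reverse = pvOuts init last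
  rw [fold_spec]
  simp

lemma A_concat (init : List (List Char)) (last : List Char) :
    pvACore (init ++ [last]) = pvOuts init last := by
  unfold pvACore
  have hn : (((init ++ [last]).length : Int) - 1) = (init.length : Int) := by
    simp
  rw [hn, PySem.List.pyRange_zero_natCast, List.foldl_map]
  show (List.range init.length).foldl
      (fun (candidates : List String) (k : Nat) =>
        if PySem.Chars.isIn ['.']
            (PySem.Chars.join ['.'] (PySem.List.slice (init ++ [last]) (some (k : Int)) none))
        then candidates ++
          [String.ofList (PySem.Chars.join ['.'] (PySem.List.slice (init ++ [last]) (some (k : Int)) none))]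
        else candidates) [] = pvOuts init last
  rw [PySem.List.foldl_append_if]
  have hcand : ∀ (k : Nat), k ∈ List.range init.length →
      PySem.Chars.join ['.'] (PySem.List.slice (init ++ [last]) (some (k : Int)) none)
        = pvSfx (init.drop k) last := by
    intro k hk
    have hk' : k < init.length := List.mem_range.mp hk
    rw [PySem.List.slice_from _ (by positivity)]
    simp only [Int.toNat_natCast]
    rw [List.drop_append_of_le_length (Nat.le_of_lt hk'), join_concat]
  have hfil : (List.range init.length).filter
      (fun (k : Nat) => PySem.Chars.isIn ['.']
        (PySem.Chars.join ['.'] (PySem.List.slice (init ++ [last]) (some (k : Int)) none)))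
      = List.range init.length := by
    apply List.filter_eq_self.mpr
    intro k hk
    have hk' : k < init.length := List.mem_range.mp hk
    have hne : init.drop k ≠ [] := by
      simp [List.drop_eq_nil_iff]; omega
    obtain ⟨q, qs, hqq⟩ := List.exists_cons_of_ne_nil hne
    rw [hcand k hk, PySem.Chars.isIn_iff_infix, hqq]
    exact (List.singleton_infix_iff _ _).mpr (dot_mem_sfx q qs last)
  rw [hfil]
  rw [List.map_congr_left (fun k hk => congrArg String.ofList (hcand k hk))]
  rw [range_map_eq_outs]
  rfl

lemma core_eq (parts : List (List Char)) (h : parts ≠ []) : pvACore parts = pvBCore parts := by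
  rcases List.eq_nil_or_concat parts with hnil | ⟨init, last, hp⟩
  · exact absurd hnil h
  · rw [List.concat_eq_append] at hp
    rw [hp, A_concat, B_concat]

-- ===== VERDICT (by name: the statement is the Claim_ definition above) =====
theorem candidate_domains_py_spec : Claim_equal_candidate_domains_py := by
  intro domain _
  show pvACore (PySem.Chars.splitOn domain.toList ['.'])
      = pvBCore (PySem.Chars.splitOn domain.toList ['.'])
  exact core_eq _ (splitOn_ne_nil _ _)
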